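-- pv_equiv track=rewrite | github.com/VictorNguyenLPN/stockfish-vision | src/match_template.py | __compress_fen_row
-- ===== SOURCE A (Python) =====
-- def __compress_fen_row(row_symbols: list) -> str:
--     compressed = ""
--     empty_count = 0
--     for s in row_symbols:
--         if s == "":
--             empty_count += 1
--         else:
--             if empty_count > 0:
--                 compressed += str(empty_count)
--                 empty_count = 0
--             compressed += s
--     if empty_count > 0:
--         compressed += str(empty_count)
--     return compressed
-- ===== SOURCE B (Python) =====
-- def __compress_fen_row(row_symbols: list) -> str:
--     # run-based: jump over maximal runs of empty squares, join parts at the end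
--     parts = []
--     i, n = 0, len(row_symbols)
--     while i < n:
--         if row_symbols[i] == "":
--             j = i
--             while j < n and row_symbols[j] == "":
--                 j += 1
--             parts.append(str(j - i))
--             i = j
--         else:
--             parts.append(row_symbols[i])
--             i += 1
--     return "".join(parts)
-- ===== Notes on version B (the rewrite author's own statement) =====
-- stated objective: alternative
-- what changed: Replaces the single pass threading an empty_count accumulator and a growing string with a run-based scan that jumps over each maximal run of empty symbols, collects parts in a list and joins once at the end.
import Mathlib
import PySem

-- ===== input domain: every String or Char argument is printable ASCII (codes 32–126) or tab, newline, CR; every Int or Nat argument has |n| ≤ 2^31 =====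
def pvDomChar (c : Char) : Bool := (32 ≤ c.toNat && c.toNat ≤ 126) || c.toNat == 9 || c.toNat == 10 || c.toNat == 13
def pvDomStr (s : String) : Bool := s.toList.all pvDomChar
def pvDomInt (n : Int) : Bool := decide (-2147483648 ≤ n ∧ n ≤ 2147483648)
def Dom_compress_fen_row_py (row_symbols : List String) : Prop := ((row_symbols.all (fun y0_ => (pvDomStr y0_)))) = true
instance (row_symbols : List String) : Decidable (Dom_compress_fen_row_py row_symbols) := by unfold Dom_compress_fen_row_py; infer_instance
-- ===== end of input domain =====

-- B replaces A's accumulator-threaded single pass by a run-based scan (jump over each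
-- maximal run of empty symbols, join the collected parts); alternative decomposition, same cost.

-- ===== PORT A =====
-- one loop step of A: thread (compressed, empty_count)
def pvStepA (acc : String × Int) (s : String) : String × Int :=
  if s = "" then (acc.1, acc.2 + 1)
  else ((if acc.2 > 0 then acc.1 ++ PySem.Int.toStr acc.2 else acc.1) ++ s, 0)

def compress_fen_row_py (row_symbols : List String) : String :=
  let st := row_symbols.foldl pvStepA ("", 0)
  if st.2 > 0 then st.1 ++ PySem.Int.toStr st.2 else st.1

-- ===== PORT B =====
-- B's outer while over runs: recursion on the remaining suffix; the inner
-- count-while over a run of "" is the takeWhile length, i jumps by dropWhile.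
def compress_fen_row_py_alt (row_symbols : List String) : String :=
  match row_symbols with
  | [] => ""
  | s :: rest =>
    if s = "" then
      PySem.Int.toStr ((rest.takeWhile (· == "")).length + 1)
        ++ compress_fen_row_py_alt (rest.dropWhile (· == ""))
    else s ++ compress_fen_row_py_alt rest
termination_by row_symbols.length
decreasing_by
  · exact Nat.lt_succ_of_le (List.length_dropWhile_le _ _)
  · exact Nat.lt_succ_self _

-- ===== PRECONDITION & SPEC =====
def Spec_compress_fen_row_py (row_symbols : List String) (out : String) : Prop := out = compress_fen_row_py_alt row_symbols
instance (row_symbols : List String) (out : String) : Decidable (Spec_compress_fen_row_py row_symbols out) := by unfold Spec_compress_fen_row_py; infer_instance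

-- ===== CLAIM (what is proved, stated in full; the proofs are below) =====
def Claim_equal_compress_fen_row_py : Prop := ∀ (row_symbols : List String), Dom_compress_fen_row_py row_symbols → Spec_compress_fen_row_py row_symbols (compress_fen_row_py row_symbols)

-- ===== LEMMAS AND PROOFS =====

-- A's flush of the pending count at the end of the loop
def pvFinish (st : String × Int) : String :=
  if st.2 > 0 then st.1 ++ PySem.Int.toStr st.2 else st.1

-- The loop invariant: running A's loop from state (acc, k) and flushing equals
-- acc followed by B's run-based output, with a pending count k merged into a
-- leading run of empties (when k > 0).
theorem pvLoopA_eq (xs : List String) : ∀ (acc : String) (k : Int), 0 ≤ k →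
    pvFinish (xs.foldl pvStepA (acc, k)) =
      (if k > 0 then
        acc ++ PySem.Int.toStr (k + ((xs.takeWhile (· == "")).length : Int))
          ++ compress_fen_row_py_alt (xs.dropWhile (· == ""))
      else acc ++ compress_fen_row_py_alt xs) := by
  induction xs with
  | nil =>
    intro acc k hk
    simp only [List.foldl_nil, List.takeWhile_nil, List.dropWhile_nil, pvFinish,
      compress_fen_row_py_alt]
    split_ifs with h
    · simp
    · simp
  | cons s rest ih =>
    intro acc k hk
    by_cases hs : s = ""
    · subst hs
      have hstep : pvStepA (acc, k) "" = (acc, k + 1) := by simp [pvStepA]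
      rw [List.foldl_cons, hstep, ih acc (k + 1) (by omega)]
      have htw : (("" :: rest).takeWhile (· == "")) = "" :: rest.takeWhile (· == "") := by
        simp
      have hdw : (("" :: rest).dropWhile (· == "")) = rest.dropWhile (· == "") := by
        simp
      simp only [if_pos (by omega : k + 1 > 0), htw, hdw]
      split_ifs with h
      · congr 3
        simp only [List.length_cons]
        push_cast
        omega
      · have hk0 : k = 0 := by omega
        subst hk0
        rw [show compress_fen_row_py_alt ("" :: rest) =
            PySem.Int.toStr ((rest.takeWhile (· == "")).length + 1)
              ++ compress_fen_row_py_alt (rest.dropWhile (· == "")) from by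
          rw [compress_fen_row_py_alt]; simp]
        have hi : (0:Int) + 1 + ((rest.takeWhile (· == "")).length : Int)
            = ((rest.takeWhile (· == "")).length : Int) + 1 := by ring
        rw [hi, String.append_assoc]
    · have hstep : pvStepA (acc, k) s =
          ((if k > 0 then acc ++ PySem.Int.toStr k else acc) ++ s, 0) := by
        simp [pvStepA, hs]
      rw [List.foldl_cons, hstep, ih _ 0 le_rfl]
      have htw : ((s :: rest).takeWhile (· == "")) = [] := by
        simp [hs]
      have hdw : ((s :: rest).dropWhile (· == "")) = s :: rest := by
        simp [hs]
      have halt : compress_fen_row_py_alt (s :: rest) = s ++ compress_fen_row_py_alt rest := by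
        rw [compress_fen_row_py_alt]; simp [hs]
      simp only [if_neg (by omega : ¬ (0:Int) > 0), htw, hdw, halt]
      split_ifs with h
      · simp [String.append_assoc]
      · simp [String.append_assoc]

-- ===== VERDICT (by name: the statement is the Claim_ definition above) =====
theorem compress_fen_row_py_spec : Claim_equal_compress_fen_row_py := by
  intro xs _
  show compress_fen_row_py xs = compress_fen_row_py_alt xs
  have h := pvLoopA_eq xs "" 0 le_rfl
  simp only [if_neg (by omega : ¬ (0:Int) > 0)] at h
  simpa [compress_fen_row_py, pvFinish] using h
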